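-- pv_equiv track=rewrite | github.com/Integrum-Global/new_project_template | apps/ai_registry/nodes/chunking_nodes.py | _find_break_point
-- ===== SOURCE A (Python) =====
-- def _find_break_point(text: str, start: int, end: int) -> int:
--     """Find natural break point near target position."""
--
--     # Look for sentence boundaries first
--     for i in range(end, start, -1):
--         if i < len(text) and text[i] in ".!?":
--             return i + 1
--
--     # Look for word boundaries
--     for i in range(end, start, -1):
--         if i < len(text) and text[i] == " ":
--             return i
--
--     # Use exact position as last resort
--     return end
-- ===== SOURCE B (Python) =====
-- def _find_break_point(text: str, start: int, end: int) -> int: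
--     """Find natural break point near target position (single forward pass)."""
--     last_punct = None
--     last_space = None
--     hi = min(end, len(text) - 1)
--     for i in range(start + 1, hi + 1):
--         c = text[i]
--         if c in ".!?":
--             last_punct = i
--         elif c == " ":
--             last_space = i
--     if last_punct is not None:
--         return last_punct + 1
--     if last_space is not None:
--         return last_space
--     return end
-- ===== Notes on version B (the rewrite author's own statement) =====
-- stated objective: alternative
-- what changed: Replaces A's two separate backward early-return scans over the full (start, end] range with one forward pass over range(start+1, min(end, len(text)-1)+1) that maintains the last punctuation index and the last space index, deciding the punctuation-over-space priority after the loop; Pre_ excludes calls whose scan range extends below -len(text), where indexing raises IndexError (B immediately; A too unless an earlier index already matched).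
-- outside the precondition, e.g. on _find_break_point('a.', -10, 1): A returns 2, B raises IndexError
import Mathlib
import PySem

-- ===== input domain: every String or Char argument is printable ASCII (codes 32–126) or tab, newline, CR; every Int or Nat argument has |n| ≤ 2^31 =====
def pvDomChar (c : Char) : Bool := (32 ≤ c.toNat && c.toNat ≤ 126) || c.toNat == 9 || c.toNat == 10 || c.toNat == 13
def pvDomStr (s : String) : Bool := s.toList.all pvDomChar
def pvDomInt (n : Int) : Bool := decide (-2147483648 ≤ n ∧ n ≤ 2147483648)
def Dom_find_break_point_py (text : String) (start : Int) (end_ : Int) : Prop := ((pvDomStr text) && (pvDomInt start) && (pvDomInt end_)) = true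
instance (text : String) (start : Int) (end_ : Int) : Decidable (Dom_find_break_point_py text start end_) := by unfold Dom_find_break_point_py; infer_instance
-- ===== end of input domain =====

-- B replaces A's two backward early-return scans over (start, end] with one forward pass over
-- range(start+1, min(end, len(text)-1)+1), tracking the last punctuation and last space index.

-- ===== PORT A =====
-- guard of A's loops: `i < len(text) and text[i] in ".!?"` / `... == " "`; where Python
-- indexing would raise (i < -len(text)), pyGet? is none and the guard reads false — such
-- inputs are excluded by Pre_find_break_point_py.
def pvIsPunct (text : String) (i : Int) : Bool :=
  i < (PySem.Str.len text) &&
    ((PySem.Str.pyGet? text i).elim false (fun c => c == '.' || c == '!' || c == '?'))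

def pvIsSpace (text : String) (i : Int) : Bool :=
  i < (PySem.Str.len text) &&
    ((PySem.Str.pyGet? text i).elim false (fun c => c == ' '))

-- first backward loop: `for i in range(end, start, -1): if …punct…: return i + 1`
def fbpFindPunct (text : String) : List Int → Option Int
  | [] => none
  | i :: rest => if pvIsPunct text i then some (i + 1) else fbpFindPunct text rest

-- second backward loop: `for i in range(end, start, -1): if …space…: return i`
def fbpFindSpace (text : String) : List Int → Option Int
  | [] => none
  | i :: rest => if pvIsSpace text i then some i else fbpFindSpace text rest

def find_break_point_py (text : String) (start : Int) (end_ : Int) : Int :=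
  match fbpFindPunct text (PySem.List.pyRange end_ start (-1)) with
  | some r => r
  | none =>
    match fbpFindSpace text (PySem.List.pyRange end_ start (-1)) with
    | some r => r
    | none => end_

-- ===== PORT B =====
-- Source B's character tests `c in ".!?"` / `c == " "` on c = text[i]; where Python indexing
-- would raise, pyGet? is none and reads as false — such inputs are excluded by Pre_.
def pvCharPunct (text : String) (i : Int) : Bool :=
  (PySem.Str.pyGet? text i).elim false (fun c => c == '.' || c == '!' || c == '?')

def pvCharSpace (text : String) (i : Int) : Bool :=
  (PySem.Str.pyGet? text i).elim false (fun c => c == ' ')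

-- loop body of Source B: overwrite last_punct / last_space (state = (last_punct, last_space))
def fbpStep (text : String) (st : Option Int × Option Int) (i : Int) : Option Int × Option Int :=
  if pvCharPunct text i then (some i, st.2)
  else if pvCharSpace text i then (st.1, some i)
  else st

-- Source B's `for i in range(start+1, hi+1)` with body `c = text[i]; …`: a step recursion on the
-- remaining iteration count; where `text[i]` would raise IndexError (pyGet? = none, possible
-- only outside Pre_) the loop stops as the Python exception does
def fbpLoop (text : String) (st : Option Int × Option Int) (i : Int) : Nat → Option Int × Option Int
  | 0 => st
  | Nat.succ fuel =>
    match PySem.Str.pyGet? text i with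
    | none => st
    | some _ => fbpLoop text (fbpStep text st i) (i + 1) fuel

def find_break_point_py_alt (text : String) (start : Int) (end_ : Int) : Int :=
  -- hi = min(end, len(text)-1); st = (last_punct, last_space) after the forward loop
  match fbpLoop text (none, none) (start + 1)
      (min end_ (PySem.Str.len text - 1) + 1 - (start + 1)).toNat with
  | (some p, _) => p + 1
  | (none, some s) => s
  | (none, none) => end_

-- ===== PRECONDITION & SPEC =====
-- Pre_ excludes calls whose scanned index range extends below -len(text): there indexing
-- raises IndexError — in B immediately, in A too unless an earlier index already matched
-- (see claim.json cites for one such excluded input on which A still returns).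
def Pre_find_break_point_py (text : String) (start : Int) (end_ : Int) : Prop :=
  end_ ≤ start ∨ -(PySem.Str.len text) ≤ start + 1
instance (text : String) (start : Int) (end_ : Int) : Decidable (Pre_find_break_point_py text start end_) := by unfold Pre_find_break_point_py; infer_instance

def pvWitness_find_break_point_py : String × Int × Int := ("Hello world. Yes", 0, 12)

def Spec_find_break_point_py (text : String) (start : Int) (end_ : Int) (out : Int) : Prop := out = find_break_point_py_alt text start end_
instance (text : String) (start : Int) (end_ : Int) (out : Int) : Decidable (Spec_find_break_point_py text start end_ out) := by unfold Spec_find_break_point_py; infer_instance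

-- ===== CLAIM (what is proved, stated in full; the proofs are below) =====
def Claim_equal_find_break_point_py : Prop := ∀ (text : String) (start : Int) (end_ : Int), Dom_find_break_point_py text start end_ → Pre_find_break_point_py text start end_ → Spec_find_break_point_py text start end_ (find_break_point_py text start end_)

-- ===== LEMMAS AND PROOFS =====

-- a punctuation hit and a space hit at the same index are mutually exclusive
theorem pvPunct_not_space (text : String) (i : Int) (h : pvCharPunct text i = true) :
    pvCharSpace text i = false := by
  unfold pvCharPunct at h
  unfold pvCharSpace
  simp at h ⊢
  rcases hg : PySem.List.pyGet? text.toList i with _ | c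
  · simp [hg] at h
  · simp [hg] at h ⊢
    rcases h with (h2 | h2) | h2 <;> simp [h2]

-- A's guarded predicates agree with B's predicates below len(text)
theorem pvPunct_agree (text : String) (i : Int) (h : i < PySem.Str.len text) :
    pvIsPunct text i = pvCharPunct text i := by
  have h' : i < (text.length : Int) := by simpa using h
  unfold pvIsPunct pvCharPunct; simp [h']

theorem pvSpace_agree (text : String) (i : Int) (h : i < PySem.Str.len text) :
    pvIsSpace text i = pvCharSpace text i := by
  have h' : i < (text.length : Int) := by simpa using h
  unfold pvIsSpace pvCharSpace; simp [h']

-- A's guarded predicates are false at or beyond len(text)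
theorem pvPunct_ge_len (text : String) (i : Int) (h : PySem.Str.len text ≤ i) :
    pvIsPunct text i = false := by
  have h' : (text.length : Int) ≤ i := by simpa using h
  unfold pvIsPunct; simp; omega

theorem pvSpace_ge_len (text : String) (i : Int) (h : PySem.Str.len text ≤ i) :
    pvIsSpace text i = false := by
  have h' : (text.length : Int) ≤ i := by simpa using h
  unfold pvIsSpace; simp; omega

-- B's pair fold splits into two independent overwrite folds
theorem pvFold_split (text : String) (L : List Int) (lp ls : Option Int) :
    L.foldl (fbpStep text) (lp, ls) =
      (L.foldl (fun s i => if pvCharPunct text i then some i else s) lp,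
       L.foldl (fun s i => if pvCharSpace text i then some i else s) ls) := by
  induction L generalizing lp ls with
  | nil => rfl
  | cons a L ih =>
    simp only [List.foldl_cons]
    rw [show fbpStep text (lp, ls) a =
        ((if pvCharPunct text a then some a else lp),
         (if pvCharSpace text a then some a else ls)) from ?_]
    · exact ih _ _
    · unfold fbpStep
      by_cases hp : pvCharPunct text a = true
      · simp [hp, pvPunct_not_space text a hp]
      · by_cases hs : pvCharSpace text a = true <;> simp [hp, hs]

-- an overwrite fold computes the last match = first match of the reversed list
theorem pvFold_or (p : Int → Bool) (L : List Int) (st : Option Int) :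
    L.foldl (fun s i => if p i then some i else s) st = (L.reverse.find? p).or st := by
  induction L generalizing st with
  | nil => rfl
  | cons a L ih =>
    simp only [List.foldl_cons, List.reverse_cons, List.find?_append, ih]
    cases h : L.reverse.find? p <;> cases hp : p a <;> simp [List.find?, hp, Option.or]

-- A's first backward loop is find? mapped through (+1)
theorem pvFindPunct_eq (text : String) (L : List Int) :
    fbpFindPunct text L = (L.find? (pvIsPunct text)).map (· + 1) := by
  induction L with
  | nil => rfl
  | cons a L ih =>
    unfold fbpFindPunct
    cases hp : pvIsPunct text a <;> simp [List.find?, hp, ih]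

-- A's second backward loop is find?
theorem pvFindSpace_eq (text : String) (L : List Int) :
    fbpFindSpace text L = L.find? (pvIsSpace text) := by
  induction L with
  | nil => rfl
  | cons a L ih =>
    unfold fbpFindSpace
    cases hp : pvIsSpace text a <;> simp [List.find?, hp, ih]

-- find? only depends on the predicate's values on the list
theorem pvFind_congr (p q : Int → Bool) (L : List Int) (h : ∀ a ∈ L, p a = q a) :
    L.find? p = L.find? q := by
  induction L with
  | nil => rfl
  | cons a L ih =>
    simp only [List.find?]
    rw [h a (by simp)]
    cases q a
    · exact ih (fun b hb => h b (by simp [hb]))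
    · rfl

-- clamping the scan range at len(text)-1 does not change A's search: a predicate that is
-- false at or beyond n finds the same first match on the reversed full and clamped ranges
theorem pvClampFind (p : Int → Bool) (start end_ n : Int)
    (hp : ∀ i, n ≤ i → p i = false) :
    ((PySem.List.pyRange (start + 1) (end_ + 1) 1).reverse).find? p =
    ((PySem.List.pyRange (start + 1) (min end_ (n - 1) + 1) 1).reverse).find? p := by
  by_cases hse : end_ ≤ start
  · rw [PySem.List.pyRange_one_eq_nil (by omega), PySem.List.pyRange_one_eq_nil (by omega)]
  · by_cases hcl : start + 1 ≤ min end_ (n - 1) + 1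
    · rw [PySem.List.pyRange_one_append (start + 1) (min end_ (n - 1) + 1) (end_ + 1) hcl (by omega)]
      rw [List.reverse_append, List.find?_append]
      have hnone : (PySem.List.pyRange (min end_ (n - 1) + 1) (end_ + 1) 1).reverse.find? p = none := by
        rw [List.find?_eq_none]
        intro i hi
        rw [List.mem_reverse, PySem.List.mem_pyRange_one] at hi
        have hn2 : n ≤ i := by omega
        simp [hp i hn2]
      rw [hnone, Option.none_or]
    · -- the whole scanned range lies at or beyond n: both searches find nothing
      have h1 : ((PySem.List.pyRange (start + 1) (end_ + 1) 1).reverse).find? p = none := by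
        rw [List.find?_eq_none]
        intro i hi
        rw [List.mem_reverse, PySem.List.mem_pyRange_one] at hi
        have hn2 : n ≤ i := by omega
        simp [hp i hn2]
      rw [h1, PySem.List.pyRange_one_eq_nil (by omega)]
      rfl

-- a valid Python index (-len ≤ j < len) never raises: pyGet? is some there
theorem pvGet_isSome (text : String) (j : Int)
    (h1 : -(PySem.Str.len text) ≤ j) (h2 : j < PySem.Str.len text) :
    (PySem.Str.pyGet? text j).isSome := by
  have h1' : -((text.length : Int)) ≤ j := by simpa using h1
  have h2' : j < (text.length : Int) := by simpa using h2
  simp [Option.isSome_iff_ne_none, PySem.List.pyGet?_eq_none_iff, PySem.Raise.InRange]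
  omega

-- on a range of valid indices the abort-on-IndexError loop is the plain fold over the range
theorem fbpLoop_eq_foldl (text : String) (k : Nat) :
    ∀ (lo : Int) (st : Option Int × Option Int),
    (∀ j : Int, lo ≤ j → j < lo + k → (PySem.Str.pyGet? text j).isSome) →
    fbpLoop text st lo k = (PySem.List.pyRange lo (lo + (k : Int)) 1).foldl (fbpStep text) st := by
  induction k with
  | zero =>
    intro lo st _
    rw [PySem.List.pyRange_one_eq_nil (by omega)]
    rfl
  | succ k ih =>
    intro lo st h
    have hs : (PySem.Str.pyGet? text lo).isSome :=
      h lo le_rfl (by push_cast; omega)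
    obtain ⟨c, hc⟩ := Option.isSome_iff_exists.mp hs
    have hc' : PySem.List.pyGet? text.toList lo = some c := by simpa using hc
    rw [show fbpLoop text st lo (k + 1) = fbpLoop text (fbpStep text st lo) (lo + 1) k from by
          simp [fbpLoop, hc']]
    rw [show lo + ((k + 1 : Nat) : Int) = (lo + 1) + (k : Int) from by push_cast; ring]
    rw [PySem.List.pyRange_one_cons (by omega), List.foldl_cons]
    exact ih (lo + 1) (fbpStep text st lo)
      (fun j hj1 hj2 => h j (by omega) (by push_cast at hj2 ⊢; omega))

-- ===== VERDICT (by name: the statement is the Claim_ definition above) =====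
theorem find_break_point_py_spec : Claim_equal_find_break_point_py := by
  intro text start end_ _ hpre
  unfold Spec_find_break_point_py find_break_point_py find_break_point_py_alt
  set n := PySem.Str.len text with hn
  by_cases hse : end_ ≤ start
  · -- empty scan on both sides: A's countdown range is nil and B's iteration count is 0
    rw [PySem.List.pyRange_neg_one_eq_nil hse,
        show (min end_ (n - 1) + 1 - (start + 1)).toNat = 0 from by omega]
    rfl
  · have hlo : -n ≤ start + 1 := by
      unfold Pre_find_break_point_py at hpre
      rcases hpre with h | h
      · exact absurd h hse
      · exact h
    have hfold : fbpLoop text (none, none) (start + 1)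
        (min end_ (n - 1) + 1 - (start + 1)).toNat =
        (PySem.List.pyRange (start + 1) (min end_ (n - 1) + 1) 1).foldl (fbpStep text) (none, none) := by
      by_cases hlh : start + 1 ≤ min end_ (n - 1) + 1
      · have hk : (start + 1) + (((min end_ (n - 1) + 1 - (start + 1)).toNat : Int)) =
            min end_ (n - 1) + 1 := by omega
        rw [fbpLoop_eq_foldl text _ (start + 1) (none, none)
              (fun j hj1 hj2 => by
                rw [hk] at hj2
                exact pvGet_isSome text j (by omega) (by omega)), hk]
      · rw [show (min end_ (n - 1) + 1 - (start + 1)).toNat = 0 from by omega,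
            PySem.List.pyRange_one_eq_nil (by omega)]
        rfl
    rw [PySem.List.pyRange_neg_one_eq_reverse]
    rw [pvFindPunct_eq, pvFindSpace_eq, hfold, pvFold_split]
    simp only [pvFold_or, Option.or_none]
    set L := PySem.List.pyRange (start + 1) (min end_ (n - 1) + 1) 1 with hL
    have hmem : ∀ i ∈ L.reverse, i < n := by
      intro i hi
      rw [List.mem_reverse, hL, PySem.List.mem_pyRange_one] at hi
      omega
    rw [pvClampFind (pvIsPunct text) start end_ n (pvPunct_ge_len text),
        pvClampFind (pvIsSpace text) start end_ n (pvSpace_ge_len text), ← hL]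
    rw [pvFind_congr (pvIsPunct text) (pvCharPunct text) L.reverse
          (fun a ha => pvPunct_agree text a (hmem a ha)),
        pvFind_congr (pvIsSpace text) (pvCharSpace text) L.reverse
          (fun a ha => pvSpace_agree text a (hmem a ha))]
    cases hP : L.reverse.find? (pvCharPunct text) <;>
      cases hS : L.reverse.find? (pvCharSpace text) <;> rfl
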